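-- pv_equiv track=rewrite | github.com/sclabs/treeshaker | treeshaker/treeshaker.py | resolve_names
-- ===== SOURCE A (Python) =====
-- def resolve_names(old_names):
--     split_names = [n.split('.') for n in old_names]
--     finals = [split_name[-1] for split_name in split_names]
--
--     # short circuite if finals are all unique
--     if len(finals) == len(set(finals)):
--         return finals
--
--     # create a map from unique finals to their indices
--     dup_map = {f: [] for f in set(finals)}
--     for i, f in enumerate(finals):
--         dup_map[f].append(i)
--
--     # create a map from old names to new, deduplicated names
--     dedup_map = {}
--     for f, idx in dup_map.items():
--         if len(idx) == 1:
--             # item is unique, add it to map unmodified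
--             dedup_map[old_names[idx[0]]] = f
--         else:
--             # item is not unique, construct alternatives
--             for i in idx:
--                 dedup_map[old_names[i]] = '%s_%s' % (f, split_names[i][-2])
--
--     return [dedup_map[n] for n in old_names]
-- ===== SOURCE B (Python) =====
-- def resolve_names(old_names):
--     split_names = [n.split('.') for n in old_names]
--     finals = [sn[-1] for sn in split_names]
--     count = {}
--     for f in finals:
--         count[f] = count.get(f, 0) + 1
--     return [f if count[f] == 1 else '%s_%s' % (f, split_names[i][-2])
--             for i, f in enumerate(finals)]
-- ===== Notes on version B (the rewrite author's own statement) =====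
-- stated objective: simpler
-- what changed: Dropped A's all-unique short-circuit, the set-keyed index-grouping dict and the dedup dict keyed on old names; B builds one frequency map of the final components and emits the result in a single per-name comprehension.
import Mathlib
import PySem

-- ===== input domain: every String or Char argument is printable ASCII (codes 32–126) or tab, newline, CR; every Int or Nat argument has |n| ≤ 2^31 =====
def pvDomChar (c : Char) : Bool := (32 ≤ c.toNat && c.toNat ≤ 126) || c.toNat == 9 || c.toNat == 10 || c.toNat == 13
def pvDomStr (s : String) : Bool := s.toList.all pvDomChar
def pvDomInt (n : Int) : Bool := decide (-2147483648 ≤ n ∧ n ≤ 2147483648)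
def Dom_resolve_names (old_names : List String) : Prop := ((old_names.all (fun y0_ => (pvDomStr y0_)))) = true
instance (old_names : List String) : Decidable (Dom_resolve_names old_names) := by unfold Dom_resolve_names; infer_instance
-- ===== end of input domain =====

-- B replaces A's set/group/dedup-dict machinery by one final-name frequency map and a single
-- per-name pass (objective: simpler). Equivalence is over the return value only.

-- ===== PORT A =====
def resolve_names (old_names : List String) : List String :=
  let split_names := old_names.map (fun n => (PySem.Str.split? n ".").getD [])
  let finals := split_names.map (fun sn => PySem.List.pyGetD sn (-1) "")
  if finals.length = (PySem.Set.ofList finals).length then finals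
  else
    let dup_map0 : PySem.Dict String (List Int) :=
      (PySem.Set.ofList finals).foldl (fun d f => d.insert f []) PySem.Dict.empty
    let dup_map := (PySem.List.enumerate finals).foldl
      (fun d p => d.modify p.2 [] (fun l => l ++ [p.1])) dup_map0
    let dedup_map : PySem.Dict String String := dup_map.items.foldl (fun dd p =>
      if p.2.length = 1 then
        dd.insert (PySem.List.pyGetD old_names (PySem.List.pyGetD p.2 0 0) "") p.1
      else
        p.2.foldl (fun dd i =>
          dd.insert (PySem.List.pyGetD old_names i "")
            (p.1 ++ "_" ++ PySem.List.pyGetD (PySem.List.pyGetD split_names i []) (-2) "")) dd)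
      PySem.Dict.empty
    old_names.map (fun n => dedup_map.getD n "")

-- ===== PORT B =====
def resolve_names_alt (old_names : List String) : List String :=
  let split_names := old_names.map (fun n => (PySem.Str.split? n ".").getD [])
  let finals := split_names.map (fun sn => PySem.List.pyGetD sn (-1) "")
  let count : PySem.Dict String Int :=
    finals.foldl (fun d f => d.insert f (d.getD f 0 + 1)) PySem.Dict.empty
  (PySem.List.enumerate finals).map (fun p =>
    if count.getD p.2 0 = 1 then p.2
    else p.2 ++ "_" ++ PySem.List.pyGetD (PySem.List.pyGetD split_names p.1 []) (-2) "")

-- ===== PRECONDITION & SPEC =====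
-- Pre_ excludes exactly the inputs on which the Python raises IndexError: a name whose final
-- '.'-component collides with another name's final but which has no parent component ([-2]).
def Pre_resolve_names (old_names : List String) : Prop :=
  ∀ n ∈ old_names,
    (old_names.map (fun m => PySem.List.pyGetD ((PySem.Str.split? m ".").getD []) (-1) "")).count
      (PySem.List.pyGetD ((PySem.Str.split? n ".").getD []) (-1) "") ≤ 1
    ∨ 2 ≤ ((PySem.Str.split? n ".").getD []).length
instance (old_names : List String) : Decidable (Pre_resolve_names old_names) := by
  unfold Pre_resolve_names; infer_instance
def pvWitness_resolve_names : List String := ["a.x", "b.x", "c"]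

def Spec_resolve_names (old_names : List String) (out : List String) : Prop := out = resolve_names_alt old_names
instance (old_names : List String) (out : List String) : Decidable (Spec_resolve_names old_names out) := by unfold Spec_resolve_names; infer_instance

-- ===== CLAIM (what is proved, stated in full; the proofs are below) =====
def Claim_equal_resolve_names : Prop := ∀ (old_names : List String), Dom_resolve_names old_names → Pre_resolve_names old_names → Spec_resolve_names old_names (resolve_names old_names)

-- ===== LEMMAS AND PROOFS =====

-- the final '.'-component of a name, its parent component, and the deduplicated name
def pvFin (n : String) : String := PySem.List.pyGetD ((PySem.Str.split? n ".").getD []) (-1) ""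
def pvPar (n : String) : String := PySem.List.pyGetD ((PySem.Str.split? n ".").getD []) (-2) ""
def pvG (old_names : List String) (n : String) : String :=
  if (old_names.map pvFin).count (pvFin n) = 1 then pvFin n
  else pvFin n ++ "_" ++ pvPar n

def pvIdx (old_names : List String) (f : String) : List Int :=
  (((PySem.List.enumerate (old_names.map pvFin) 0).map Prod.swap).filter (fun q => q.1 == f)).map (·.2)

def pvInner (old_names : List String) (f : String) (dd : PySem.Dict String String) (i : Int) : PySem.Dict String String :=
  dd.insert (PySem.List.pyGetD old_names i "")
    (f ++ "_" ++ PySem.List.pyGetD (PySem.List.pyGetD (old_names.map (fun n => (PySem.Str.split? n ".").getD [])) i []) (-2) "")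

def pvStep (old_names : List String) (dd : PySem.Dict String String) (p : String × List Int) : PySem.Dict String String :=
  if p.2.length = 1 then dd.insert (PySem.List.pyGetD old_names (PySem.List.pyGetD p.2 0 0) "") p.1
  else p.2.foldl (pvInner old_names p.1) dd

def pvQ (old_names : List String) (dd : PySem.Dict String String) : Prop :=
  ∀ m v, dd.get? m = some v → v = pvG old_names m

lemma pyGetD_idx {α : Type} (xs : List α) (k : Nat) (d : α) (hk : k < xs.length) :
    PySem.List.pyGetD xs (k:Int) d = xs[k] := by
  rw [PySem.List.pyGetD_natCast, List.getD_eq_getElem]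

lemma mem_pvIdx (old_names : List String) (f : String) (i : Int) :
    i ∈ pvIdx old_names f ↔ ∃ k, ∃ h : k < old_names.length, i = (k:Int) ∧ pvFin old_names[k] = f := by
  simp only [pvIdx, List.mem_map, List.mem_filter, PySem.List.mem_enumerate_iff]
  constructor
  · rintro ⟨a, ⟨⟨a1, ⟨k, hk, hq⟩, hsw⟩, hf⟩, hi⟩
    subst hq; subst hsw
    simp only [List.length_map] at hk
    exact ⟨k, hk, by simpa using hi.symm, by simpa [Prod.swap, List.getElem_map] using hf⟩
  · rintro ⟨k, hk, hi, hf⟩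
    refine ⟨((old_names.map pvFin)[k]'(by simpa using hk), (0:Int) + (k:Int)),
      ⟨⟨((0:Int) + (k:Int), (old_names.map pvFin)[k]'(by simpa using hk)),
        ⟨k, by simpa using hk, rfl⟩, rfl⟩, by simpa [List.getElem_map] using hf⟩,
      by simpa using hi.symm⟩

lemma countP_enumerate {α : Type} (xs : List α) (s : Int) (p : α → Bool) :
    (PySem.List.enumerate xs s).countP (fun q => p q.2) = xs.countP p := by
  induction xs generalizing s with
  | nil => simp [PySem.List.enumerate_nil]
  | cons x xs ih => simp [PySem.List.enumerate_cons, List.countP_cons, ih]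

lemma len_pvIdx (old_names : List String) (f : String) :
    (pvIdx old_names f).length = (old_names.map pvFin).count f := by
  simp only [pvIdx, List.length_map, ← List.countP_eq_length_filter, List.countP_map]
  rw [show ((fun q : String × Int => q.1 == f) ∘ (Prod.swap : Int × String → String × Int)) = (fun q : Int × String => q.2 == f) from rfl]
  rw [countP_enumerate (old_names.map pvFin) 0 (fun y => y == f)]
  simp [List.count]

lemma splits_getElem (old_names : List String) (k : Nat) (hk : k < old_names.length) :
    (old_names.map (fun n => (PySem.Str.split? n ".").getD []))[k]'(by simpa using hk)
      = (PySem.Str.split? (old_names[k]) ".").getD [] := by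
  simp [List.getElem_map]

lemma inner_val (old_names : List String) (f : String) (dd : PySem.Dict String String)
    (k : Nat) (hk : k < old_names.length) (hf : pvFin old_names[k] = f)
    (hcnt : (old_names.map pvFin).count f ≠ 1) :
    pvInner old_names f dd (k:Int)
      = dd.insert old_names[k] (pvG old_names old_names[k]) := by
  unfold pvInner
  rw [pyGetD_idx old_names k "" hk, pyGetD_idx _ k [] (by simpa using hk), splits_getElem old_names k hk]
  unfold pvG
  rw [hf, if_neg hcnt]
  rfl

lemma Q_insert (old_names : List String) (dd : PySem.Dict String String) (m : String)
    (hQ : pvQ old_names dd) :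
    pvQ old_names (dd.insert m (pvG old_names m)) := by
  intro m' v h
  rw [PySem.Dict.get?_insert] at h
  split at h
  · cases h; subst ‹m' = m›; rfl
  · exact hQ m' v h

lemma Q_inner (old_names : List String) (f : String)
    (hcnt : (old_names.map pvFin).count f ≠ 1) :
    ∀ (is : List Int), (∀ i ∈ is, ∃ k, ∃ h : k < old_names.length, i = (k:Int) ∧ pvFin old_names[k] = f) →
    ∀ dd, pvQ old_names dd → pvQ old_names (is.foldl (pvInner old_names f) dd) := by
  intro is
  induction is with
  | nil => intro _ dd h; exact h
  | cons i is ih =>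
    intro hmem dd hQ
    obtain ⟨k, hk, hi, hf⟩ := hmem i (by simp)
    subst hi
    rw [List.foldl_cons, inner_val old_names f dd k hk hf hcnt]
    exact ih (fun j hj => hmem j (by simp [hj])) _ (Q_insert _ _ _ hQ)

lemma Q_step (old_names : List String) (dd : PySem.Dict String String) (p : String × List Int)
    (hp : p.2 = pvIdx old_names p.1) (hQ : pvQ old_names dd) :
    pvQ old_names (pvStep old_names dd p) := by
  unfold pvStep
  split
  · -- unique: p.2 = [i], count p.1 = 1
    rename_i hlen
    obtain ⟨a, ha⟩ := List.length_eq_one_iff.mp hlen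
    have hcnt : (old_names.map pvFin).count p.1 = 1 := by
      rw [← len_pvIdx, ← hp, hlen]
    obtain ⟨k, hk, hik, hf⟩ := (mem_pvIdx old_names p.1 a).mp (by rw [← hp, ha]; simp)
    subst hik
    have hkey : PySem.List.pyGetD p.2 0 0 = (k:Int) := by
      rw [ha]; rfl
    rw [hkey, pyGetD_idx old_names k "" hk]
    have hval : p.1 = pvG old_names old_names[k] := by
      unfold pvG
      rw [hf, if_pos hcnt]
    rw [hval]
    exact Q_insert _ _ _ hQ
  · rename_i hlen
    have hcnt : (old_names.map pvFin).count p.1 ≠ 1 := by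
      rw [← len_pvIdx, ← hp]; exact hlen
    exact Q_inner old_names p.1 hcnt p.2
      (fun i hi => (mem_pvIdx old_names p.1 i).mp (hp ▸ hi)) dd hQ

lemma Q_fold (old_names : List String) :
    ∀ (L : List (String × List Int)), (∀ p ∈ L, p.2 = pvIdx old_names p.1) →
    ∀ dd, pvQ old_names dd → pvQ old_names (L.foldl (pvStep old_names) dd) := by
  intro L
  induction L with
  | nil => intro _ dd h; exact h
  | cons p L ih =>
    intro hmem dd hQ
    rw [List.foldl_cons]
    exact ih (fun q hq => hmem q (by simp [hq])) _ (Q_step old_names dd p (hmem p (by simp)) hQ)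

lemma contains_inner_mono (old_names : List String) (f n : String) :
    ∀ (is : List Int) (dd : PySem.Dict String String), dd.contains n = true →
    (is.foldl (pvInner old_names f) dd).contains n = true := by
  intro is
  induction is with
  | nil => intro dd h; exact h
  | cons i is ih =>
    intro dd h
    rw [List.foldl_cons]
    exact ih _ (by unfold pvInner; rw [PySem.Dict.contains_insert]; simp [h])

lemma contains_inner_hit (old_names : List String) (f n : String) (k : Nat)
    (hk : k < old_names.length) (hn : old_names[k] = n) :
    ∀ (is : List Int) (dd : PySem.Dict String String), (k:Int) ∈ is →
    (is.foldl (pvInner old_names f) dd).contains n = true := by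
  intro is
  induction is with
  | nil => intro dd h; simp at h
  | cons i is ih =>
    intro dd hmem
    rw [List.foldl_cons]
    rcases List.mem_cons.mp hmem with h | h
    · apply contains_inner_mono
      unfold pvInner
      rw [← h, pyGetD_idx old_names k "" hk, hn]
      exact PySem.Dict.contains_insert_self _ _ _
    · exact ih _ h

lemma contains_step_mono (old_names : List String) (n : String)
    (dd : PySem.Dict String String) (p : String × List Int) (h : dd.contains n = true) :
    (pvStep old_names dd p).contains n = true := by
  unfold pvStep
  split
  · rw [PySem.Dict.contains_insert]; simp [h]
  · exact contains_inner_mono old_names p.1 n p.2 dd h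

lemma contains_step_hit (old_names : List String) (n : String) (hn : n ∈ old_names)
    (dd : PySem.Dict String String) :
    (pvStep old_names dd (pvFin n, pvIdx old_names (pvFin n))).contains n = true := by
  obtain ⟨k, hk, hnk⟩ := List.mem_iff_getElem.mp hn
  have hkin : (k:Int) ∈ pvIdx old_names (pvFin n) := by
    rw [mem_pvIdx]
    exact ⟨k, hk, rfl, by rw [hnk]⟩
  unfold pvStep
  split
  · rename_i hlen
    simp only at hlen
    obtain ⟨a, ha⟩ := List.length_eq_one_iff.mp hlen
    have hak : a = (k:Int) := by
      have := hkin
      rw [ha] at this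
      simpa using (List.mem_singleton.mp this).symm
    simp only [ha, hak]
    have hkey : PySem.List.pyGetD [(k:Int)] 0 0 = (k:Int) := rfl
    rw [hkey, pyGetD_idx old_names k "" hk, hnk]
    exact PySem.Dict.contains_insert_self _ _ _
  · exact contains_inner_hit old_names (pvFin n) n k hk hnk _ dd hkin

lemma contains_fold (old_names : List String) (n : String) (hn : n ∈ old_names) :
    ∀ (L : List (String × List Int)) (dd : PySem.Dict String String),
    ((pvFin n, pvIdx old_names (pvFin n)) ∈ L ∨ dd.contains n = true) →
    (L.foldl (pvStep old_names) dd).contains n = true := by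
  intro L
  induction L with
  | nil =>
    rintro dd (h | h)
    · simp at h
    · exact h
  | cons p L ih =>
    rintro dd h
    rw [List.foldl_cons]
    rcases h with h | h
    · rcases List.mem_cons.mp h with h | h
      · exact ih _ (Or.inr (by rw [← h]; exact contains_step_hit old_names n hn dd))
      · exact ih _ (Or.inl h)
    · exact ih _ (Or.inr (contains_step_mono old_names n dd p h))

lemma foldl_insert_nil_getD (L : List String) (d : PySem.Dict String (List Int))
    (hd : ∀ g, d.getD g [] = ([]:List Int)) (f : String) :
    (L.foldl (fun d g => d.insert g []) d).getD f [] = [] := by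
  induction L generalizing d with
  | nil => exact hd f
  | cons x L ih =>
    rw [List.foldl_cons]
    exact ih _ (fun g => by rw [PySem.Dict.getD_insert]; split <;> simp [hd])

lemma dup_map_getD (old_names : List String) (f : String) :
    ((PySem.List.enumerate (old_names.map pvFin) 0).foldl
      (fun d p => d.modify p.2 [] (fun l => l ++ [p.1]))
      ((PySem.Set.ofList (old_names.map pvFin)).foldl
        (fun d g => d.insert g []) PySem.Dict.empty)).getD f []
    = pvIdx old_names f := by
  rw [show List.foldl (fun d p => d.modify p.2 [] fun l => l ++ [p.1])
      (List.foldl (fun d g => d.insert g []) PySem.Dict.empty (PySem.Set.ofList (List.map pvFin old_names)))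
      (PySem.List.enumerate (List.map pvFin old_names))
      = List.foldl (fun (d : PySem.Dict String (List Int)) (q : String × Int) => d.modify q.1 [] fun l => l ++ [q.2])
        (List.foldl (fun d g => d.insert g []) PySem.Dict.empty (PySem.Set.ofList (List.map pvFin old_names)))
        ((PySem.List.enumerate (List.map pvFin old_names)).map Prod.swap) from
    Eq.trans (by rfl) List.foldl_map.symm]
  rw [PySem.Dict.getD_foldl_modify_append]
  rw [foldl_insert_nil_getD _ _ (fun g => PySem.Dict.getD_empty _ _)]
  rfl

lemma dup_map_items (old_names : List String) :
    ((PySem.List.enumerate (old_names.map pvFin) 0).foldl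
      (fun d p => d.modify p.2 [] (fun l => l ++ [p.1]))
      ((PySem.Set.ofList (old_names.map pvFin)).foldl
        (fun d g => d.insert g []) PySem.Dict.empty)).items
    = (PySem.Set.ofList (old_names.map pvFin)).map (fun f => (f, pvIdx old_names f)) := by
  have hkeys0 : ((PySem.Set.ofList (old_names.map pvFin)).foldl
      (fun d g => d.insert g ([]:List Int)) PySem.Dict.empty).keys
      = PySem.Set.ofList (old_names.map pvFin) := by
    rw [PySem.Dict.keys_foldl_insert (PySem.Set.ofList (old_names.map pvFin)) (fun _ _ => []) PySem.Dict.empty]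
    rw [PySem.Dict.keys_empty, PySem.Set.update_nil_left, PySem.Set.ofList_ofList]
  have hkeys : ((PySem.List.enumerate (old_names.map pvFin) 0).foldl
      (fun d p => d.modify p.2 [] (fun l => l ++ [p.1]))
      ((PySem.Set.ofList (old_names.map pvFin)).foldl
        (fun d g => d.insert g []) PySem.Dict.empty)).keys
      = PySem.Set.ofList (old_names.map pvFin) := by
    rw [PySem.Dict.keys_foldl_modify_key (PySem.List.enumerate (old_names.map pvFin) 0)
      (fun p => p.2) [] (fun d p => fun l => l ++ [p.1])]
    rw [hkeys0]
    rw [show (PySem.List.enumerate (old_names.map pvFin) 0).map (fun p => p.2) = old_names.map pvFin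
      from PySem.List.map_snd_enumerate _ _]
    rw [PySem.Set.update_eq_append_filter]
    rw [List.filter_eq_nil_iff.mpr (fun y hy => by
      rw [(PySem.Set.contains_iff _ _).mpr hy]; simp)]
    simp
  have hnodup : ((PySem.List.enumerate (old_names.map pvFin) 0).foldl
      (fun d p => d.modify p.2 [] (fun l => l ++ [p.1]))
      ((PySem.Set.ofList (old_names.map pvFin)).foldl
        (fun d g => d.insert g []) PySem.Dict.empty)).keys.Nodup := by
    rw [hkeys]; exact PySem.Set.nodup_ofList _
  rw [PySem.Dict.items_eq_map_keys _ hnodup [], hkeys]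
  exact List.map_congr_left (fun f _ => by rw [dup_map_getD])

lemma nodup_of_len_eq (xs : List String) (h : xs.length = (PySem.Set.ofList xs).length) :
    xs.Nodup := by
  have hperm : (PySem.Set.ofList xs).Perm xs.dedup := by
    rw [List.perm_ext_iff_of_nodup (PySem.Set.nodup_ofList xs) xs.nodup_dedup]
    intro a
    rw [PySem.Set.mem_ofList, List.mem_dedup]
  have hlen : xs.dedup.length = xs.length := by
    rw [← hperm.length_eq, ← h]
  rw [← List.dedup_eq_self]
  exact xs.dedup_sublist.eq_of_length hlen

lemma fins_eq (old_names : List String) :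
    (old_names.map (fun n => (PySem.Str.split? n ".").getD [])).map
      (fun sn => PySem.List.pyGetD sn (-1) "") = old_names.map pvFin := by
  rw [List.map_map]; rfl

lemma alt_eq (old_names : List String) :
    resolve_names_alt old_names = old_names.map (pvG old_names) := by
  unfold resolve_names_alt
  simp only []
  rw [fins_eq]
  apply List.ext_getElem
  · simp [PySem.List.length_enumerate]
  intro k h1 h2
  simp only [PySem.List.length_enumerate, List.length_map] at h1
  rw [List.getElem_map, PySem.List.getElem_enumerate]
  · have hk : ((0:Int) + (k:Int)) = (k:Int) := by omega
    rw [List.getElem_map]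
    rw [hk, PySem.List.pyGetD_natCast, List.getElem_map,
      PySem.Dict.getD_foldl_insert_add_one, PySem.Dict.getD_empty,
      List.getD_eq_getElem _ _ (by simpa using h1)]
    simp only [List.getElem_map]
    unfold pvG
    have : ((0:Int) + List.count (pvFin old_names[k]) (old_names.map pvFin) = 1) ↔
        (List.count (pvFin old_names[k]) (old_names.map pvFin) = 1) := by omega
    rw [if_congr this rfl rfl]
    rfl

lemma a_eq (old_names : List String) :
    resolve_names old_names = old_names.map (pvG old_names) := by
  unfold resolve_names
  simp only []
  rw [fins_eq]
  split
  · rename_i h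
    have hnd : (old_names.map pvFin).Nodup := nodup_of_len_eq _ h
    symm
    apply List.map_congr_left
    intro n hn
    unfold pvG
    rw [if_pos (List.count_eq_one_of_mem hnd (List.mem_map_of_mem hn))]
  · -- deduplication route
    have hitems := dup_map_items old_names
    set dmap := (PySem.List.enumerate (old_names.map pvFin) 0).foldl
      (fun d p => d.modify p.2 [] (fun l => l ++ [p.1]))
      ((PySem.Set.ofList (old_names.map pvFin)).foldl
        (fun d g => d.insert g []) PySem.Dict.empty) with hdmap
    show old_names.map (fun n => (dmap.items.foldl (pvStep old_names) PySem.Dict.empty).getD n "")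
      = old_names.map (pvG old_names)
    apply List.map_congr_left
    intro n hn
    have hQ : pvQ old_names (dmap.items.foldl (pvStep old_names) PySem.Dict.empty) := by
      apply Q_fold old_names dmap.items
      · intro p hp
        rw [hitems] at hp
        obtain ⟨f, _, rfl⟩ := List.mem_map.mp hp
        rfl
      · intro m v h
        rw [PySem.Dict.get?_empty] at h
        cases h
    have hc : (dmap.items.foldl (pvStep old_names) PySem.Dict.empty).contains n = true := by
      apply contains_fold old_names n hn
      left
      rw [hitems]
      exact List.mem_map_of_mem (by rw [PySem.Set.mem_ofList]; exact List.mem_map_of_mem hn)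
    rw [PySem.Dict.contains_eq_isSome_get?] at hc
    obtain ⟨v, hv⟩ := Option.isSome_iff_exists.mp hc
    rw [PySem.Dict.getD_of_get?_eq_some _ _ hv]
    exact hQ n v hv

-- ===== VERDICT (by name: the statement is the Claim_ definition above) =====
theorem resolve_names_spec : Claim_equal_resolve_names := by
  intro old_names _ _
  unfold Spec_resolve_names
  rw [a_eq, alt_eq]
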